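-- pv_equiv track=rewrite | github.com/luciobx/NSI_formation | 22_NSIJ2ME1/Exercice_2_D_pile_sans_effetDeBord_AvecArgument.py | parcourir_pile_en_reduisant
-- ===== SOURCE A (Python) =====
-- def creer_pile_vide() :
--     """Renvoyer une liste vide"""
--     return []
--
-- def est_vide(p):
--     """Renvoie le booléen True si la pile est vide, False sinon."""
--     return p==[]
--
-- def empiler(p, element):
--     """Place l'élément v au sommet de la pile."""
--     p.append(element)
--
-- def depiler(p):
--     """Retirer un élément
--
--     Retire et renvoie l’élément placé au sommet de la pile,
--     si la pile n’est pas vide.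
--     """
--     if not est_vide(p):
--         return p.pop()
--     else:
--         return None
--
-- def sommet(p):
--     """Renvoyer le sommet
--
--     Renvoie l’élément placé au sommet de la pile,
--     si la pile n’est pas vide.
--     """
--     if not est_vide(p):
--         return p[-1]
--     else:
--         return None
--
-- def taille(p):
--     """Renvoyer la taille de la pile."""
--     return len(p)
--
-- def reduire_triplet_au_sommet(p):
--     """Reduction de la pile p
--     permet de supprimer l'élément central des trois premiers éléments
--     en partant du haut de la pile,
--     si l'élément du  bas et du haut sont de même parité.
--     Les éléments dépilés et non supprimés sont
--     replacés dans le bon ordre dans la pile.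
--     """
--     # la pile p étant une liste c'est un objet muable
--     # On commence par en faire une copie (superficielle)
--     # p = [p[i] for i in range(len(p))]
--     # p = list(p)
--     p = p.copy()
--     a = depiler(p)
--     b = depiler(p)
--     c = sommet(p)
--     if a % 2 != c % 2:
--         empiler(p, b)
--     empiler(p, a)
--     return p
--
-- def parcourir_pile_en_reduisant(p):
--     """ parcourir la pile p en réduisant
--     parcourt la pile du haut vers le bas en procédant aux réductions
--     pour chaque triplet rencontré quand cela est possible
--     """
--     q = creer_pile_vide()
--     # la pile p étant une liste c'est un objet muable
--     # On commence par en faire une copie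
--     # p = [p[i] for i in range(len(p))]
--     # p = list(p)
--     p = p.copy()
--     while taille(p) >= 3 :
--         p = reduire_triplet_au_sommet(p) # fonction
--         e = depiler(p)
--         empiler(q, e)
--     while not est_vide(q):
--         e = depiler(q)
--         empiler(p, e)
--     return p
-- ===== SOURCE B (Python) =====
-- def parcourir_pile_en_reduisant(p):
--     """Single top-to-bottom pass over the reversed list with an index pointer;
--     no per-step full-stack copies."""
--     r = p[::-1]          # r[0] is the top of the stack
--     if len(r) < 3:
--         return list(p)
--     out = []
--     h = r[0]
--     i = 1
--     while i + 1 < len(r):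
--         c = r[i + 1]
--         out.append(h)
--         if h % 2 == c % 2:
--             h = c
--             i += 2
--         else:
--             h = r[i]
--             i += 1
--     return (out + [h] + r[i:])[::-1]
-- ===== Notes on version B (the rewrite author's own statement) =====
-- stated objective: faster
-- what changed: Replaces the repeated full-stack copy + pop/push triplet reduction (a new list copy per loop iteration) by a single top-to-bottom pass over the reversed list with an index pointer and an output accumulator, reversing once at the end.
import Mathlib
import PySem

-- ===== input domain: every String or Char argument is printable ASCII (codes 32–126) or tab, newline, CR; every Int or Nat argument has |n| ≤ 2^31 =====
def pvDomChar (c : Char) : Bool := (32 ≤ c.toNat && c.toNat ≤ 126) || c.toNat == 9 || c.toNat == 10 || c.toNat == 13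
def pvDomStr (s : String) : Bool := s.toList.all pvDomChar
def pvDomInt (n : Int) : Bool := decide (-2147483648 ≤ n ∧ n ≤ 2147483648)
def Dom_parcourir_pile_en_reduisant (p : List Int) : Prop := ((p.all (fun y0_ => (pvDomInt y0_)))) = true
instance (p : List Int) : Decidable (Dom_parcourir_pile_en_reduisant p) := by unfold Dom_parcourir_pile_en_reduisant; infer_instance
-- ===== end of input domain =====

-- B replaces A's per-iteration full-stack copy + pop/push reduction by a single pass over
-- the reversed list with an index pointer (return value only; A does not mutate its argument).

-- ===== PORT A =====
-- est_vide(p)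
def estVide (p : List Int) : Bool := p == []

-- empiler(p, element): p.append(element)  (stack top = end of the list)
def empiler (p : List Int) (element : Int) : List Int := p ++ [element]

-- depiler(p): (popped value or None, the list after the mutation)
def depiler (p : List Int) : Option Int × List Int :=
  if !estVide p then (p.getLast?, p.dropLast) else (none, p)

-- sommet(p)
def sommet (p : List Int) : Option Int :=
  if !estVide p then PySem.List.pyGet? p (-1) else none

-- reduire_triplet_au_sommet(p)
def reduire_triplet_au_sommet (p0 : List Int) : List Int :=
  let r1 := depiler p0
  let r2 := depiler r1.2
  match r1.1, r2.1, sommet r2.2 with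
  | some a, some b, some c =>
      let p3 := if PySem.Int.mod a 2 ≠ PySem.Int.mod c 2 then empiler r2.2 b else r2.2
      empiler p3 a
  | _, _, _ => p0
  -- fall-through unreachable in A: reduire is only called under the caller's 'taille(p) >= 3'
  -- guard; with fewer elements Python would raise TypeError (None % 2)

-- length bound cited by aLoop's decreasing_by (termination of the first while loop)
theorem reduire_length_le (p : List Int) :
    (reduire_triplet_au_sommet p).length ≤ p.length := by
  rcases p with _ | ⟨x, _ | ⟨y, _ | ⟨z, t⟩⟩⟩
  · simp [reduire_triplet_au_sommet, depiler, estVide]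
  · simp [reduire_triplet_au_sommet, depiler, estVide, sommet]
  · simp [reduire_triplet_au_sommet, depiler, estVide, sommet]
  · rcases hE : (x :: y :: z :: t).reverse with _ | ⟨a, _ | ⟨b, _ | ⟨c, l'⟩⟩⟩
    · have := congrArg List.length hE; simp at this
    · have := congrArg List.length hE; simp at this
    · have := congrArg List.length hE; simp at this
    · have hp : x :: y :: z :: t = l'.reverse ++ [c, b, a] := by
        rw [← List.reverse_reverse (x :: y :: z :: t), hE]; simp
      rw [hp]
      simp [reduire_triplet_au_sommet, depiler, estVide, sommet, empiler]
      split_ifs <;> simp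

-- first while loop of parcourir_pile_en_reduisant: the state (p, q) after the loop
def aLoop (p q : List Int) : List Int × List Int :=
  if _hlen : p.length ≥ 3 then
    match hm : depiler (reduire_triplet_au_sommet p) with
    | (some e, p2) => aLoop p2 (empiler q e)
    | (none, p2) => (p2, q)   -- unreachable: the reduced stack has ≥ 2 elements
  else (p, q)
termination_by p.length
decreasing_by
  have hle := reduire_length_le p
  by_cases hne : reduire_triplet_au_sommet p = []
  · simp [depiler, estVide, hne] at hm
  · simp [depiler, estVide, hne] at hm
    have h1 : 1 ≤ (reduire_triplet_au_sommet p).length := List.length_pos_iff.mpr hne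
    have h2 : p2.length = (reduire_triplet_au_sommet p).length - 1 := by
      rw [← hm.2]; simp
    omega

-- second while loop: pop everything from q back onto p
def aDrain (q p : List Int) : List Int :=
  if _hq : !estVide q then
    match hm : depiler q with
    | (some e, q2) => aDrain q2 (empiler p e)
    | (none, _) => p   -- unreachable: q is non-empty here
  else p
termination_by q.length
decreasing_by
  by_cases hne : q = []
  · simp [depiler, estVide, hne] at hm
  · simp [depiler, estVide, hne] at hm
    have h1 : 1 ≤ q.length := List.length_pos_iff.mpr hne
    have h2 : q2.length = q.length - 1 := by rw [← hm.2]; simp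
    omega

def parcourir_pile_en_reduisant (p : List Int) : List Int :=
  let q : List Int := []        -- q = creer_pile_vide()
  let st := aLoop p q           -- p = p.copy(); while taille(p) >= 3: ...
  aDrain st.2 st.1              -- while not est_vide(q): ...

-- ===== PORT B =====
-- the while loop of Source B: h is the current head, r the suffix r[i:], out the accumulator
def altGo (h : Int) (r : List Int) (out : List Int) : List Int :=
  match r with
  | b :: c :: rest =>
      if PySem.Int.mod h 2 = PySem.Int.mod c 2 then altGo c rest (out ++ [h])
      else altGo b (c :: rest) (out ++ [h])
  | _ => out ++ h :: r          -- (out + [h] + r[i:])  before the final reversal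
termination_by r.length
decreasing_by all_goals simp

def parcourir_pile_en_reduisant_alt (p : List Int) : List Int :=
  if p.length < 3 then p
  else
    match p.reverse with        -- r = p[::-1]
    | h :: rest => (altGo h rest []).reverse
    | [] => p                   -- unreachable: p.length ≥ 3

-- ===== PRECONDITION & SPEC =====
def Spec_parcourir_pile_en_reduisant (p : List Int) (out : List Int) : Prop := out = parcourir_pile_en_reduisant_alt p
instance (p : List Int) (out : List Int) : Decidable (Spec_parcourir_pile_en_reduisant p out) := by unfold Spec_parcourir_pile_en_reduisant; infer_instance

-- ===== CLAIM (what is proved, stated in full; the proofs are below) =====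
def Claim_equal_parcourir_pile_en_reduisant : Prop := ∀ (p : List Int), Dom_parcourir_pile_en_reduisant p → Spec_parcourir_pile_en_reduisant p (parcourir_pile_en_reduisant p)

-- ===== LEMMAS AND PROOFS =====

theorem depiler_append (l : List Int) (x : Int) : depiler (l ++ [x]) = (some x, l) := by
  simp [depiler, estVide]

theorem sommet_append (l : List Int) (x : Int) : sommet (l ++ [x]) = some x := by
  simp [sommet, estVide, PySem.List.pyGet?_neg_one_append_singleton]

-- what one call of reduire_triplet_au_sommet does to a stack of ≥ 3 elements (a is the top)
theorem reduire_char (l : List Int) (a b c : Int) :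
    reduire_triplet_au_sommet (l ++ [c, b, a]) =
      if PySem.Int.mod a 2 ≠ PySem.Int.mod c 2 then l ++ [c, b, a] else l ++ [c, a] := by
  have h1 : l ++ [c, b, a] = (l ++ [c, b]) ++ [a] := by simp
  have h2 : l ++ [c, b] = (l ++ [c]) ++ [b] := by simp
  rw [reduire_triplet_au_sommet, h1, depiler_append]
  simp only [h2, depiler_append, sommet_append, empiler]
  split_ifs <;> simp

theorem aDrain_eq (q p : List Int) : aDrain q p = p ++ q.reverse := by
  induction q using List.reverseRecOn generalizing p with
  | nil => simp [aDrain, estVide]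
  | append_singleton l x ih =>
      rw [aDrain, dif_pos (by simp [estVide])]
      split
      · next e q2 hm =>
          rw [depiler_append] at hm
          injection hm with ha hb
          injection ha with ha
          rw [← hb, ← ha, empiler, ih]
          simp
      · next q2 hm =>
          rw [depiler_append] at hm
          injection hm with ha hb
          exact absurd ha (by simp)

theorem aLoop_step (p q p2 : List Int) (e : Int) (h3 : p.length ≥ 3)
    (hd : depiler (reduire_triplet_au_sommet p) = (some e, p2)) :
    aLoop p q = aLoop p2 (empiler q e) := by
  rw [aLoop]
  simp only [h3, dite_true]
  split
  · next e2 p3 hm => rw [hd] at hm; injection hm with ha hb; injection ha with ha; rw [ha, hb]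
  · next p3 hm => rw [hd] at hm; injection hm with ha hb; exact absurd ha (by simp)

-- the loop invariant: A's first loop on the stack (h :: r).reverse, followed by the drain,
-- computes exactly B's accumulator pass
theorem key (n : Nat) : ∀ (r : List Int), r.length ≤ n → ∀ (h : Int) (q : List Int),
    (aLoop (h :: r).reverse q).1 ++ (aLoop (h :: r).reverse q).2.reverse
      = (altGo h r q).reverse := by
  induction n with
  | zero =>
    intro r hr h q
    have : r = [] := by simpa using hr
    subst this
    rw [aLoop]; simp [altGo]
  | succ n ih =>
    intro r hr h q
    match r with
    | [] => rw [aLoop]; simp [altGo]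
    | [b] => rw [aLoop]; simp [altGo]
    | b :: c :: rest =>
      have h3 : (h :: b :: c :: rest).reverse.length ≥ 3 := by simp
      have hrev : (h :: b :: c :: rest).reverse = rest.reverse ++ [c, b, h] := by simp
      by_cases hpar : h % 2 = c % 2
      · have hred : reduire_triplet_au_sommet ((h :: b :: c :: rest).reverse)
            = ((c :: rest).reverse) ++ [h] := by
          rw [hrev, reduire_char]; simp [hpar]
        rw [aLoop_step _ q _ h h3 (by rw [hred, depiler_append])]
        rw [ih rest (by simp at hr; omega) c (empiler q h)]
        simp [altGo, hpar, empiler]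
      · have hred : reduire_triplet_au_sommet ((h :: b :: c :: rest).reverse)
            = ((b :: c :: rest).reverse) ++ [h] := by
          rw [hrev, reduire_char]; simp [hpar]
        rw [aLoop_step _ q _ h h3 (by rw [hred, depiler_append])]
        rw [ih (c :: rest) (by simp at hr ⊢; omega) b (empiler q h)]
        simp [altGo, hpar, empiler]

theorem final_eq (p : List Int) : parcourir_pile_en_reduisant p = parcourir_pile_en_reduisant_alt p := by
  unfold parcourir_pile_en_reduisant
  rw [aDrain_eq]
  rcases hE : p.reverse with _ | ⟨h, rest⟩
  · have hp : p = [] := by simpa using congrArg List.reverse hE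
    subst hp
    rw [aLoop]
    simp [parcourir_pile_en_reduisant_alt]
  · have hp : p = (h :: rest).reverse := by
      rw [← hE, List.reverse_reverse]
    rw [hp]
    rw [key rest.length rest le_rfl h []]
    unfold parcourir_pile_en_reduisant_alt
    by_cases hlen : ((h :: rest).reverse).length < 3
    · rw [if_pos hlen]
      match rest, (by simp at hlen; omega : rest.length ≤ 1) with
      | [], _ => simp [altGo]
      | [b], _ => simp [altGo]
    · rw [if_neg hlen]
      rw [List.reverse_reverse]

-- ===== VERDICT (by name: the statement is the Claim_ definition above) =====
theorem parcourir_pile_en_reduisant_spec : Claim_equal_parcourir_pile_en_reduisant := by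
  intro p _
  unfold Spec_parcourir_pile_en_reduisant
  exact final_eq p
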